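-- pv_equiv track=rewrite | github.com/ahdavies6/NLP_QA | text_analyzer.py | get_to_phrases
-- ===== SOURCE A (Python) =====
-- def restring(sentence):
--     restring = []
--     for word in sentence:
--         restring.append(word[0])
--
--     return ' '.join(restring)
--
-- def get_to_phrases(tagged_sentence):
--     x_phrases = []
--     x_words = []
--     for word in tagged_sentence:
--         if len(x_words) == 0:
--             if word[1] == 'TO':
--                 x_words.append(word)
--         elif word[1] == 'VB':
--             x_words.append(word)
--         else:
--             if len(x_words) > 1:
--                 x_phrases.append(restring(x_words))
--             x_words.clear()
--     if len(x_words) > 1: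
--         x_phrases.append(restring(x_words))
--         x_words.clear()
--
--     return x_phrases
-- ===== SOURCE B (Python) =====
-- def get_to_phrases(tagged_sentence):
--     phrases = []
--     n = len(tagged_sentence)
--     i = 0
--     while i < n:
--         if tagged_sentence[i][1] == 'TO':
--             run = [tagged_sentence[i][0]]
--             j = i + 1
--             while j < n and tagged_sentence[j][1] == 'VB':
--                 run.append(tagged_sentence[j][0])
--                 j += 1
--             if len(run) > 1:
--                 phrases.append(' '.join(run))
--             i = j + 1  # the word that ended the run is consumed, not rescanned
--         else:
--             i += 1
--     return phrases
-- ===== Notes on version B (the rewrite author's own statement) =====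
-- stated objective: alternative
-- what changed: Replaces A's single flat scan with an accumulator list and flush-on-terminator state machine by an explicit index pointer: on a 'TO' an inner while-loop collects the consecutive 'VB' run directly, emits the joined phrase if it has more than one word, and skips past the terminating word (i = j+1).
import Mathlib
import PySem

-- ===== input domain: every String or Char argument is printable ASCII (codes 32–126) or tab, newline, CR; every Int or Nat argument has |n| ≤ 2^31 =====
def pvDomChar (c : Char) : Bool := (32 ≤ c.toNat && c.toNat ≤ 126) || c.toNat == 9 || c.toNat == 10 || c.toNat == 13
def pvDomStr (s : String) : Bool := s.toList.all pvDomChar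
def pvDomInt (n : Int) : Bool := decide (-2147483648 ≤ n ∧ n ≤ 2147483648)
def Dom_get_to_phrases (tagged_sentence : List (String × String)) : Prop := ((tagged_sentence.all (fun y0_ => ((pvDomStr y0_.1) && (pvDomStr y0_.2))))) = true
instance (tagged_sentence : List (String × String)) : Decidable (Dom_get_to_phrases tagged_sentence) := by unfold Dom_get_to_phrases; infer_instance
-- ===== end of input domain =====

-- B replaces A's accumulator state machine by an index pointer with an inner run-collecting loop (same cost, different decomposition).

-- ===== PORT A =====
-- ' '.join of the first components, built by appending as the Python does
def restring (sentence : List (String × String)) : String :=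
  PySem.Str.join " " (sentence.foldl (fun acc w => acc ++ [w.1]) [])

-- the body of A's for-loop, acting on the state (x_phrases, x_words)
def stepA (st : List String × List (String × String)) (word : String × String) :
    List String × List (String × String) :=
  if st.2.length == 0 then
    (if word.2 == "TO" then (st.1, st.2 ++ [word]) else st)
  else if word.2 == "VB" then (st.1, st.2 ++ [word])
  else ((if st.2.length > 1 then st.1 ++ [restring st.2] else st.1), [])

def get_to_phrases (tagged_sentence : List (String × String)) : List String :=
  let st := tagged_sentence.foldl stepA ([], [])
  if st.2.length > 1 then st.1 ++ [restring st.2] else st.1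

-- ===== PORT B =====
-- Both loops advance their index by at least one per iteration, so n iterations
-- always suffice: the fuel argument (= n) is only a structural totality guard.
-- inner while-loop: j walks forward over consecutive 'VB' words, extending run
def collectJ (l : List (String × String)) (n : Nat) : Nat → Nat → List String → List String × Nat
  | 0, j, run => (run, j)
  | fuel + 1, j, run =>
    if j < n ∧ (l.getD j ("", "")).2 == "VB" then
      collectJ l n fuel (j + 1) (run ++ [(l.getD j ("", "")).1])
    else (run, j)

-- outer while-loop over the index i
def goB (l : List (String × String)) (n : Nat) : Nat → Nat → List String
  | 0, _ => []
  | fuel + 1, i =>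
    if i < n then
      if (l.getD i ("", "")).2 == "TO" then
        let p := collectJ l n n (i + 1) [(l.getD i ("", "")).1]
        (if p.1.length > 1 then [PySem.Str.join " " p.1] else []) ++ goB l n fuel (p.2 + 1)
      else goB l n fuel (i + 1)
    else []

def get_to_phrases_alt (tagged_sentence : List (String × String)) : List String :=
  goB tagged_sentence tagged_sentence.length tagged_sentence.length 0

-- ===== PRECONDITION & SPEC =====
def Spec_get_to_phrases (tagged_sentence : List (String × String)) (out : List String) : Prop := out = get_to_phrases_alt tagged_sentence
instance (tagged_sentence : List (String × String)) (out : List String) : Decidable (Spec_get_to_phrases tagged_sentence out) := by unfold Spec_get_to_phrases; infer_instance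

-- ===== CLAIM (what is proved, stated in full; the proofs are below) =====
def Claim_equal_get_to_phrases : Prop := ∀ (tagged_sentence : List (String × String)), Dom_get_to_phrases tagged_sentence → Spec_get_to_phrases tagged_sentence (get_to_phrases tagged_sentence)

-- ===== LEMMAS AND PROOFS =====

-- length of the leading 'VB' run
def vbLen : List (String × String) → Nat
  | [] => 0
  | w :: r => if w.2 = "VB" then vbLen r + 1 else 0

theorem vbLen_le (l : List (String × String)) : vbLen l ≤ l.length := by
  induction l with
  | nil => simp [vbLen]
  | cons w r ih => by_cases h : w.2 = "VB" <;> simp [vbLen, h] <;> omega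

-- structural (suffix-based) reformulation of B's outer loop, used only in the proofs
def goS : Nat → List (String × String) → List String
  | 0, _ => []
  | _ + 1, [] => []
  | fuel + 1, w :: rest =>
    if w.2 = "TO" then
      (if (w.1 :: (rest.take (vbLen rest)).map Prod.fst).length > 1 then
          [PySem.Str.join " " (w.1 :: (rest.take (vbLen rest)).map Prod.fst)]
        else []) ++ goS fuel ((rest.drop (vbLen rest)).tail)
    else goS fuel rest

theorem goS_congr : ∀ (f g : Nat) (l : List (String × String)),
    l.length ≤ f → l.length ≤ g → goS f l = goS g l := by
  intro f
  induction f with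
  | zero =>
    intro g l hf _
    have : l = [] := by simpa using List.length_eq_zero_iff.mp (by omega)
    cases g <;> simp [this, goS]
  | succ f ih =>
    intro g l hf hg
    cases l with
    | nil => cases g <;> simp [goS]
    | cons w rest =>
      cases g with
      | zero => simp at hg
      | succ g =>
        simp only [goS]
        have h1 : ((rest.drop (vbLen rest)).tail).length ≤ f := by
          have := List.length_drop (l := rest) (i := vbLen rest)
          have := List.length_tail (l := rest.drop (vbLen rest))
          simp at hf
          omega
        have h2 : ((rest.drop (vbLen rest)).tail).length ≤ g := by
          have := List.length_drop (l := rest) (i := vbLen rest)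
          have := List.length_tail (l := rest.drop (vbLen rest))
          simp at hg
          omega
        rw [ih g ((rest.drop (vbLen rest)).tail) h1 h2,
          ih g rest (by simp at hf; omega) (by simp at hg; omega)]

theorem foldl_append_fst (l : List (String × String)) (acc : List String) :
    l.foldl (fun a w => a ++ [w.1]) acc = acc ++ l.map Prod.fst := by
  induction l generalizing acc with
  | nil => simp
  | cons w r ih => simp [ih]

theorem restring_eq (xw : List (String × String)) :
    restring xw = PySem.Str.join " " (xw.map Prod.fst) := by
  unfold restring
  rw [foldl_append_fst]
  simp

theorem getD_at (l : List (String × String)) (j : Nat) (hj : j < l.length) :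
    l.getD j ("", "") = l[j] := by
  simp [List.getD_eq_getElem?_getD, List.getElem?_eq_getElem hj]

-- bridging B's inner index loop to vbLen / take / drop on the suffix
theorem collectJ_bridge (l : List (String × String)) :
    ∀ fuel j run, l.length - j ≤ fuel → collectJ l l.length fuel j run =
      (run ++ ((l.drop j).take (vbLen (l.drop j))).map Prod.fst, j + vbLen (l.drop j)) := by
  intro fuel
  induction fuel with
  | zero =>
    intro j run h
    have hd : l.drop j = [] := List.drop_eq_nil_of_le (by omega)
    simp [collectJ, hd, vbLen]
  | succ f ih =>
    intro j run h
    simp only [collectJ]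
    by_cases hj : j < l.length
    · have hdrop : l.drop j = l[j] :: l.drop (j + 1) := List.drop_eq_getElem_cons hj
      rw [getD_at l j hj]
      by_cases hvb : (l[j]).2 = "VB"
      · rw [if_pos (by simp [hj, hvb])]
        rw [ih (j + 1) (run ++ [(l[j]).1]) (by omega)]
        rw [hdrop]
        have hvl : vbLen (l[j] :: l.drop (j + 1)) = vbLen (l.drop (j + 1)) + 1 := by
          simp [vbLen, hvb]
        rw [hvl]
        refine Prod.ext ?_ ?_
        · simp only [List.map_cons, List.map_take, List.map_drop]
          rw [List.take_succ_cons]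
          simp
        · simp; omega
      · rw [if_neg (by simp [hvb])]
        rw [hdrop]
        have hvl : vbLen (l[j] :: l.drop (j + 1)) = 0 := by simp [vbLen, hvb]
        rw [hvl]
        simp
    · have hd : l.drop j = [] := List.drop_eq_nil_of_le (by omega)
      rw [if_neg (by intro hc; exact hj hc.1)]
      simp [hd, vbLen]

-- bridging B's outer index loop to the structural version
theorem goB_eq_goS (l : List (String × String)) :
    ∀ fuel i, l.length - i ≤ fuel → goB l l.length fuel i = goS fuel (l.drop i) := by
  intro fuel
  induction fuel with
  | zero => intro i h; simp [goB, goS]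
  | succ f ih =>
    intro i h
    by_cases hi : i < l.length
    · have hdrop : l.drop i = l[i] :: l.drop (i + 1) := List.drop_eq_getElem_cons hi
      simp only [goB]
      rw [if_pos hi, getD_at l i hi, hdrop]
      simp only [goS]
      by_cases hto : (l[i]).2 = "TO"
      · rw [if_pos (by simp [hto]), if_pos hto]
        rw [collectJ_bridge l l.length (i + 1) [(l[i]).1] (by omega)]
        have hdt : ((l.drop (i + 1)).drop (vbLen (l.drop (i + 1)))).tail =
            l.drop (i + 1 + vbLen (l.drop (i + 1)) + 1) := by
          rw [List.drop_drop, List.tail_drop]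
        rw [hdt, ih (i + 1 + vbLen (l.drop (i + 1)) + 1) (by omega)]
        simp
      · rw [if_neg (by simp [hto]), if_neg hto]
        exact ih (i + 1) (by omega)
    · have hd : l.drop i = [] := List.drop_eq_nil_of_le (by omega)
      simp only [goB]
      rw [if_neg hi, hd]
      simp [goS]

-- A's step, with the already-collected phrases pulled out in front
theorem stepA_shift (ph : List String) (xw : List (String × String)) (w : String × String) :
    stepA (ph, xw) w = (ph ++ (stepA ([], xw) w).1, (stepA ([], xw) w).2) := by
  simp only [stepA]
  split_ifs <;> simp

-- A's phrase list only grows: pull the accumulated phrases out in front of the fold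
theorem foldl_stepA_shift (l : List (String × String)) :
    ∀ ph xw, l.foldl stepA (ph, xw) =
      (ph ++ (l.foldl stepA ([], xw)).1, (l.foldl stepA ([], xw)).2) := by
  induction l with
  | nil => simp
  | cons w r ih =>
    intro ph xw
    simp only [List.foldl_cons, stepA_shift ph xw w]
    rcases hsa : stepA ([], xw) w with ⟨a1, a2⟩
    rw [ih (ph ++ a1) a2, ih a1 a2]
    simp

-- A's result starting from words-state xw, including the final flush
def finishA (l : List (String × String)) (xw : List (String × String)) : List String :=
  let st := l.foldl stepA ([], xw)
  if st.2.length > 1 then st.1 ++ [restring st.2] else st.1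

-- the main invariant: A's state machine computes goS
theorem finishA_main (l : List (String × String)) :
    ∀ fuel, l.length ≤ fuel →
    (finishA l [] = goS fuel l) ∧
      (∀ ws : List (String × String), ws ≠ [] →
        finishA l ws =
          (if ws.length + vbLen l > 1 then
              [PySem.Str.join " " ((ws ++ l.take (vbLen l)).map Prod.fst)]
            else []) ++ goS fuel ((l.drop (vbLen l)).tail)) := by
  induction l with
  | nil =>
    intro fuel _
    refine ⟨by cases fuel <;> simp [finishA, goS], ?_⟩
    intro ws hws
    simp only [finishA, List.foldl_nil, vbLen, List.take_nil, List.drop_nil,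
      List.tail_nil, List.append_nil, Nat.add_zero]
    by_cases h1 : ws.length > 1
    · rw [if_pos h1, if_pos h1, restring_eq]
      cases fuel <;> simp [goS]
    · rw [if_neg h1, if_neg h1]
      cases fuel <;> simp [goS]
  | cons w r ih =>
    intro fuel hfuel
    obtain ⟨f, rfl⟩ : ∃ f, fuel = f + 1 := ⟨fuel - 1, by simp at hfuel; omega⟩
    have hrf : r.length ≤ f := by simp at hfuel; omega
    constructor
    · by_cases hto : w.2 = "TO"
      · have hstep : stepA ([], []) w = ([], [w]) := by simp [stepA, hto]
        have h2 := (ih f hrf).2 [w] (by simp)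
        rw [finishA] at h2 ⊢
        simp only [List.foldl_cons, hstep]
        rw [h2]
        simp only [goS]
        rw [if_pos hto]
        have htk : (r.take (vbLen r)).length = vbLen r := by
          have h := vbLen_le r
          rw [List.length_take]
          omega
        have hlc : (w.1 :: (r.take (vbLen r)).map Prod.fst).length = vbLen r + 1 := by
          simp only [List.length_cons, List.length_map, htk]
        congr 1
        by_cases hc : [w].length + vbLen r > 1
        · rw [if_pos hc, if_pos (by rw [hlc]; simp at hc; omega)]
          simp
        · rw [if_neg hc, if_neg (by rw [hlc]; simp at hc; omega)]
      · have hstep : stepA ([], []) w = ([], []) := by simp [stepA, hto]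
        have h1 := (ih f hrf).1
        rw [finishA] at h1 ⊢
        simp only [List.foldl_cons, hstep]
        rw [h1]
        simp only [goS]
        rw [if_neg hto]
    · intro ws hws
      have hwsl : ws.length ≠ 0 := by simpa using hws
      by_cases hvb : w.2 = "VB"
      · have hstep : stepA ([], ws) w = ([], ws ++ [w]) := by
          simp only [stepA]
          rw [if_neg (by simp [hwsl]), if_pos (by simp [hvb])]
        have h2 := (ih f hrf).2 (ws ++ [w]) (by simp)
        rw [finishA] at h2 ⊢
        simp only [List.foldl_cons, hstep]
        rw [h2]
        have hvl : vbLen (w :: r) = vbLen r + 1 := by simp [vbLen, hvb]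
        rw [hvl]
        simp only [List.take_succ_cons, List.drop_succ_cons]
        have hgt1 : ((ws ++ [w]).length + vbLen r > 1) := by simp; omega
        have hgt2 : (ws.length + (vbLen r + 1) > 1) := by omega
        rw [if_pos hgt1, if_pos hgt2]
        have hcongr : goS f ((r.drop (vbLen r)).tail) = goS (f + 1) ((r.drop (vbLen r)).tail) := by
          refine goS_congr f (f + 1) _ ?_ ?_ <;>
            · have := List.length_drop (l := r) (i := vbLen r)
              have := List.length_tail (l := r.drop (vbLen r))
              omega
        rw [hcongr] at h2 ⊢
        simp
      · have hstep : stepA ([], ws) w =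
            ((if ws.length > 1 then [restring ws] else []), []) := by
          simp only [stepA]
          rw [if_neg (by simp [hwsl]), if_neg (by simp [hvb])]
          by_cases h1 : ws.length > 1
          · rw [if_pos h1, if_pos h1]; simp
          · rw [if_neg h1, if_neg h1]
        have hvl : vbLen (w :: r) = 0 := by simp [vbLen, hvb]
        rw [finishA]
        simp only [List.foldl_cons, hstep, hvl,
          foldl_stepA_shift r (if ws.length > 1 then [restring ws] else []) [],
          List.take_zero, List.drop_zero, List.tail_cons, List.append_nil, Nat.add_zero]
        have h1 := (ih f hrf).1
        rw [finishA] at h1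
        have hcongr : goS f r = goS (f + 1) r := goS_congr f (f + 1) r hrf (by omega)
        rw [hcongr] at h1
        by_cases hlen : ((r.foldl stepA ([], [])).2).length > 1
        · rw [if_pos hlen] at h1 ⊢
          rw [← h1]
          by_cases hw1 : ws.length > 1
          · rw [if_pos hw1, if_pos hw1, restring_eq]
            simp
          · rw [if_neg hw1, if_neg hw1]
            simp
        · rw [if_neg hlen] at h1 ⊢
          rw [← h1]
          by_cases hw1 : ws.length > 1
          · rw [if_pos hw1, if_pos hw1, restring_eq]
          · rw [if_neg hw1, if_neg hw1]

-- ===== VERDICT (by name: the statement is the Claim_ definition above) =====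
theorem get_to_phrases_spec : Claim_equal_get_to_phrases := by
  intro l _
  show get_to_phrases l = get_to_phrases_alt l
  have hA : get_to_phrases l = finishA l [] := rfl
  have hB : get_to_phrases_alt l = goS l.length l := by
    show goB l l.length l.length 0 = goS l.length l
    have := goB_eq_goS l l.length 0 (by omega)
    simpa using this
  rw [hA, hB, (finishA_main l l.length (le_refl _)).1]
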